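-- pv_equiv track=rewrite | github.com/sedders123/aoc | 2017/01/one.py | captcha_solver
-- ===== SOURCE A (Python) =====
-- def captcha_solver(captcha: str) -> int:
--     previous_char = None
--     numbers = []  # type : List
--     for char in captcha:
--         # first letter
--         if not previous_char:
--             previous_char = char
--             continue
--         if char == previous_char:
--             numbers.append(int(char))
--         previous_char = char
--     # Circular
--     if captcha[0] == captcha[-1]:
--         numbers.append(int(captcha[0]))
--     return sum(numbers)
-- ===== SOURCE B (Python) =====
-- def captcha_solver(captcha: str) -> int:
--     # Stage 1: run-length encode the string into (char, run length) pairs.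
--     runs = []
--     for ch in captcha:
--         if runs and runs[-1][0] == ch:
--             runs[-1][1] += 1
--         else:
--             runs.append([ch, 1])
--     # Stage 2: a run of digit d with length L contributes int(d) * (L - 1).
--     total = sum(int(d) * (L - 1) for d, L in runs if L > 1)
--     # Circular wrap-around.
--     if captcha[0] == captcha[-1]:
--         total += int(captcha[0])
--     return total
-- ===== Notes on version B (the rewrite author's own statement) =====
-- stated objective: alternative
-- what changed: Replaces A's previous-char state machine appending one digit per matching adjacent pair by a two-stage pass: run-length encode the string, then sum int(d)*(L-1) over runs of length > 1, plus the same circular wrap check.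
import Mathlib
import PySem

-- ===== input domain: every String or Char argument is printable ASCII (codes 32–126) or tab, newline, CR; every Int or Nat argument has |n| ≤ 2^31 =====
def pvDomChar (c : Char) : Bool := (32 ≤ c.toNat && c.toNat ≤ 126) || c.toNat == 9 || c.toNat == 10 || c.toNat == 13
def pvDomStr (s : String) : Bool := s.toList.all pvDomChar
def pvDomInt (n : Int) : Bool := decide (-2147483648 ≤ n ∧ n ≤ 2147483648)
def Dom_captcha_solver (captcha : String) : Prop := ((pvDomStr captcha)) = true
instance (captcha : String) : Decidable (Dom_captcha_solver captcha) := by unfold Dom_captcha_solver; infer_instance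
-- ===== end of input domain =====

-- B replaces A's previous-char state machine (one appended digit per matching adjacent pair)
-- by a two-stage pass: run-length encode the string, then sum int(d)*(L-1) over runs with
-- L > 1, plus the same circular wrap check; same O(n) cost.

-- ===== PORT A =====
-- int(char) for a digit character; Pre_ guarantees int() is only reached on digits, where this is exact.
def pyDigitA (c : Char) : Int := (c.toNat : Int) - 48

-- the for-loop of A: state is (previous_char, numbers)
def captchaLoopA : List Char → Option Char → List Int → List Int
  | [], _, nums => nums
  | c :: rest, none, nums => captchaLoopA rest (some c) nums
  | c :: rest, some p, nums =>
      captchaLoopA rest (some c) (if c = p then nums ++ [pyDigitA c] else nums)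

def captcha_solver (captcha : String) : Int :=
  let l := captcha.toList
  let nums := captchaLoopA l none []
  let nums2 :=
    match PySem.List.pyGet? l 0, PySem.List.pyGet? l (-1) with
    | some a, some b => if a = b then nums ++ [pyDigitA a] else nums
    | _, _ => nums   -- Python raises IndexError here (empty captcha); excluded by Pre_
  nums2.sum

-- ===== PORT B =====
-- int(char) for a digit character (B's copy; ports share no definitions)
def pyDigitB (c : Char) : Int := (c.toNat : Int) - 48

-- one step of the run-length-encoding loop: bump the last run or start a new one
def rleStep (runs : List (Char × Int)) (ch : Char) : List (Char × Int) :=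
  match runs.getLast? with
  | some (c, n) => if c = ch then runs.dropLast ++ [(c, n + 1)] else runs ++ [(ch, 1)]
  | none => runs ++ [(ch, 1)]

def captcha_solver_alt (captcha : String) : Int :=
  let runs := captcha.toList.foldl rleStep []
  let total :=
    ((runs.filter (fun r => decide (1 < r.2))).map (fun r => pyDigitB r.1 * (r.2 - 1))).sum
  match PySem.List.pyGet? captcha.toList 0 with
  | none => total   -- Python raises IndexError here (empty captcha); excluded by Pre_
  | some a =>
    match PySem.List.pyGet? captcha.toList (-1) with
    | none => total
    | some b => if a = b then total + pyDigitB a else total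

-- ===== PRECONDITION & SPEC =====
-- Pre_ excludes exactly the inputs where BOTH Pythons raise: the empty string (IndexError on
-- captcha[0]) and strings where int() is applied to a non-digit (adjacent equal non-digit
-- characters, or equal non-digit first/last characters: ValueError).
def Pre_captcha_solver (captcha : String) : Prop :=
  captcha.toList ≠ [] ∧
  (∀ p ∈ captcha.toList.zip captcha.toList.tail, p.1 = p.2 → p.1.isDigit = true) ∧
  (captcha.toList.head? = captcha.toList.getLast? → (captcha.toList.headD ' ').isDigit = true)
instance (captcha : String) : Decidable (Pre_captcha_solver captcha) := by
  unfold Pre_captcha_solver; infer_instance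

def pvWitness_captcha_solver : String := "91212129"

def Spec_captcha_solver (captcha : String) (out : Int) : Prop := out = captcha_solver_alt captcha
instance (captcha : String) (out : Int) : Decidable (Spec_captcha_solver captcha out) := by
  unfold Spec_captcha_solver; infer_instance

-- ===== CLAIM (what is proved, stated in full; the proofs are below) =====
def Claim_equal_captcha_solver : Prop := ∀ (captcha : String), Dom_captcha_solver captcha → Pre_captcha_solver captcha → Spec_captcha_solver captcha (captcha_solver captcha)

-- ===== LEMMAS AND PROOFS =====

-- sum of the adjacent-equal-pair digits of a list (the common value both ports compute)
def pairSum : List Char → Int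
  | a :: b :: rest => (if a = b then pyDigitA a else 0) + pairSum (b :: rest)
  | _ => 0

theorem pairSum_single (a : Char) : pairSum [a] = 0 := rfl
theorem pairSum_cons (a b : Char) (rest : List Char) :
    pairSum (a :: b :: rest) = (if a = b then pyDigitA a else 0) + pairSum (b :: rest) := rfl

theorem captchaLoopA_sum (l : List Char) :
    ∀ (p : Char) (nums : List Int),
      (captchaLoopA l (some p) nums).sum = nums.sum + pairSum (p :: l) := by
  induction l with
  | nil => intro p nums; simp [captchaLoopA, pairSum_single]
  | cons c rest ih =>
      intro p nums
      simp only [captchaLoopA, ih, pairSum_cons]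
      by_cases h : c = p
      · subst h; simp [add_assoc]
      · have h' : p ≠ c := fun e => h e.symm
        simp [h, h']

theorem captcha_solver_eq (captcha : String) (h : captcha.toList ≠ []) :
    captcha_solver captcha =
      pairSum captcha.toList +
        (if captcha.toList.headD ' ' = captcha.toList.getLast h then
          pyDigitA (captcha.toList.headD ' ') else 0) := by
  obtain ⟨c, rest, e⟩ := List.exists_cons_of_ne_nil h
  unfold captcha_solver
  simp only [e]
  have hget0 : PySem.List.pyGet? (c :: rest) 0 = some c := by
    simp
  have hlast : PySem.List.pyGet? (c :: rest) (-1) = (c :: rest).getLast? := by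
    exact PySem.List.pyGet?_neg_one _
  have hloop : captchaLoopA (c :: rest) none [] = captchaLoopA rest (some c) [] := rfl
  have hsum : (captchaLoopA (c :: rest) none []).sum = pairSum (c :: rest) := by
    rw [hloop, captchaLoopA_sum]; simp
  have hln : (c :: rest).getLast? = some ((c :: rest).getLast (by simp)) := by
    simp [List.getLast?_eq_some_getLast]
  rw [hget0, hlast, hln]
  have hl2 : (c :: rest).getLast (by simp) = captcha.toList.getLast h := by
    congr 1; exact e.symm
  by_cases hcl : c = (c :: rest).getLast (by simp)
  · simp only [if_pos hcl]
    simp [hsum, ← hcl, List.headD]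
  · simp only [if_neg hcl]
    simp [hsum, List.headD, hcl]

theorem pyDigitB_eq : pyDigitB = pyDigitA := rfl

-- value of a run list: each run (c, n) contributes pyDigitA c * (n - 1)
def sumRuns (runs : List (Char × Int)) : Int :=
  (runs.map (fun r => pyDigitA r.1 * (r.2 - 1))).sum

theorem sumRuns_append (a b : List (Char × Int)) :
    sumRuns (a ++ b) = sumRuns a + sumRuns b := by
  simp [sumRuns]

-- the RLE loop, seeded with a nonempty run list, accumulates exactly pairSum of
-- (last char of the seed :: remaining input)
theorem rle_sum (l : List Char) :
    ∀ (runs : List (Char × Int)) (p : Char) (n : Int),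
      runs.getLast? = some (p, n) →
      sumRuns (l.foldl rleStep runs) = sumRuns runs + pairSum (p :: l) := by
  induction l with
  | nil => intro runs p n _; simp [pairSum_single]
  | cons c rest ih =>
      intro runs p n hlast
      have hne : runs ≠ [] := by
        intro e; rw [e] at hlast; simp at hlast
      have hg : runs.getLast hne = (p, n) := by
        have h2 := List.getLast?_eq_some_getLast hne
        rw [h2] at hlast
        exact Option.some_inj.mp hlast
      have hrw : runs = runs.dropLast ++ [(p, n)] := by
        rw [← hg]
        exact (List.dropLast_concat_getLast hne).symm
      simp only [List.foldl_cons]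
      by_cases hpc : p = c
      · subst hpc
        have hstep : rleStep runs p = runs.dropLast ++ [(p, n + 1)] := by
          unfold rleStep
          rw [hlast]
          simp
        rw [hstep, ih _ p (n + 1) (by simp)]
        conv_rhs => rw [hrw]
        rw [sumRuns_append, sumRuns_append, pairSum_cons, if_pos rfl]
        simp [sumRuns]
        ring
      · have hstep : rleStep runs c = runs ++ [(c, 1)] := by
          unfold rleStep
          rw [hlast]
          simp [hpc]
        rw [hstep, ih _ c 1 (by simp)]
        rw [sumRuns_append, pairSum_cons, if_neg hpc]
        simp [sumRuns]
  
-- every run the loop builds has length at least 1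
theorem rle_pos (l : List Char) :
    ∀ (runs : List (Char × Int)), (∀ r ∈ runs, 1 ≤ r.2) →
      ∀ r ∈ l.foldl rleStep runs, 1 ≤ r.2 := by
  induction l with
  | nil => intro runs h; simpa using h
  | cons c rest ih =>
      intro runs h
      simp only [List.foldl_cons]
      apply ih
      intro r hr
      rcases e : runs.getLast? with _ | ⟨p, n⟩ <;> simp only [rleStep, e] at hr
      · rcases List.mem_append.mp hr with h1 | h1
        · exact h r h1
        · simp at h1; simp [h1]
      · by_cases hpc : p = c
        · rw [if_pos hpc] at hr
          rcases List.mem_append.mp hr with h1 | h1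
          · exact h r (List.Sublist.subset (List.dropLast_sublist _) h1)
          · have hn : 1 ≤ n := by
              have hne : runs ≠ [] := by intro e2; rw [e2] at e; simp at e
              have : (p, n) ∈ runs := by
                rw [List.getLast?_eq_some_getLast hne] at e
                rw [← Option.some_inj.mp e]
                exact List.getLast_mem hne
              exact h _ this
            simp at h1; simp [h1]; omega
        · rw [if_neg hpc] at hr
          rcases List.mem_append.mp hr with h1 | h1
          · exact h r h1
          · simp at h1; simp [h1]

-- dropping the length-1 runs (which contribute 0) does not change the sum
theorem sumRuns_filter (runs : List (Char × Int)) (h : ∀ r ∈ runs, 1 ≤ r.2) :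
    ((runs.filter (fun r => decide (1 < r.2))).map (fun r => pyDigitA r.1 * (r.2 - 1))).sum
      = sumRuns runs := by
  induction runs with
  | nil => rfl
  | cons r rest ih =>
      have hr : 1 ≤ r.2 := h r (by simp)
      have ih' := ih (fun x hx => h x (by simp [hx]))
      by_cases h1 : 1 < r.2
      · simp [h1, sumRuns] at ih' ⊢
        omega
      · have h2 : r.2 = 1 := by omega
        simp [sumRuns, h2] at ih' ⊢
        omega

theorem captcha_solver_alt_eq (captcha : String) (h : captcha.toList ≠ []) :
    captcha_solver_alt captcha =
      pairSum captcha.toList +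
        (if captcha.toList.headD ' ' = captcha.toList.getLast h then
          pyDigitA (captcha.toList.headD ' ') else 0) := by
  obtain ⟨c, rest, e⟩ := List.exists_cons_of_ne_nil h
  unfold captcha_solver_alt
  simp only [e, pyDigitB_eq]
  have hstep0 : (c :: rest).foldl rleStep [] = rest.foldl rleStep [(c, 1)] := by
    simp [List.foldl_cons, rleStep]
  have hsum : sumRuns (rest.foldl rleStep [(c, 1)]) = pairSum (c :: rest) := by
    rw [rle_sum rest [(c, 1)] c 1 (by simp)]
    simp [sumRuns]
  have hpos : ∀ r ∈ rest.foldl rleStep [(c, 1)], 1 ≤ r.2 :=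
    rle_pos rest [(c, 1)] (by simp)
  have htot :
      (((rest.foldl rleStep [(c, 1)]).filter (fun r => decide (1 < r.2))).map
          (fun r => pyDigitA r.1 * (r.2 - 1))).sum = pairSum (c :: rest) := by
    rw [sumRuns_filter _ hpos, hsum]
  have hget0 : PySem.List.pyGet? (c :: rest) 0 = some c := by
    simp
  have hlast : PySem.List.pyGet? (c :: rest) (-1) = (c :: rest).getLast? := by
    exact PySem.List.pyGet?_neg_one _
  have hln : (c :: rest).getLast? = some ((c :: rest).getLast (by simp)) := by
    simp [List.getLast?_eq_some_getLast]
  rw [hstep0, htot, hget0, hlast, hln]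
  have hl2 : (c :: rest).getLast (by simp) = captcha.toList.getLast h := by
    congr 1; exact e.symm
  by_cases hcl : c = (c :: rest).getLast (by simp)
  · simp only [if_pos hcl]
    simp [← hcl, List.headD]
  · simp only [if_neg hcl]
    simp [List.headD, hcl]

-- ===== VERDICT (by name: the statement is the Claim_ definition above) =====
theorem captcha_solver_spec : Claim_equal_captcha_solver := by
  intro captcha _ hpre
  unfold Spec_captcha_solver
  have h : captcha.toList ≠ [] := hpre.1
  rw [captcha_solver_eq captcha h, captcha_solver_alt_eq captcha h]
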